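-- pv_equiv track=rewrite | github.com/Stavin13/Disease-Prediction-App | app.py | validate_symptoms
-- ===== SOURCE A (Python) =====
-- def get_symptom_suggestions():
--     """Get comprehensive symptom suggestions by category"""
--     return {
--         "Cardiovascular": [
--             "chest pain", "shortness of breath", "irregular heartbeat",
--             "rapid heartbeat", "slow heartbeat", "dizziness when standing",
--             "fainting", "swollen legs", "cold extremities", "chest pressure"
--         ],
--         "Respiratory": [
--             "persistent cough", "wheezing", "coughing up blood",
--             "difficulty breathing", "rapid breathing", "chest congestion",
--             "sleep apnea", "excessive sputum", "noisy breathing"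
--         ],
--         "Neurological": [
--             "severe headache", "confusion", "memory problems",
--             "difficulty speaking", "vision changes", "weakness in limbs",
--             "tremors", "loss of balance", "seizures", "numbness"
--         ],
--         "Gastrointestinal": [
--             "severe abdominal pain", "persistent nausea", "vomiting",
--             "difficulty swallowing", "unexplained weight loss",
--             "blood in stool", "heartburn", "loss of appetite"
--         ],
--         "General": [
--             "fatigue", "fever", "night sweats", "unexplained weight loss",
--             "muscle weakness", "joint pain", "skin changes", "anxiety",
--             "depression", "sleep problems"
--         ]
--     }
--
-- def validate_symptoms(symptoms):
--     """Validate symptoms against expanded list"""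
--     all_symptoms = []
--     for category in get_symptom_suggestions().values():
--         all_symptoms.extend(category)
--
--     symptom_list = [s.strip().lower() for s in symptoms.split(",")]
--     valid_symptoms = [s for s in symptom_list if s in all_symptoms]
--     unknown_symptoms = [s for s in symptom_list if s not in all_symptoms]
--     return valid_symptoms, unknown_symptoms
-- ===== SOURCE B (Python) =====
-- def get_symptom_suggestions():
--     """Get comprehensive symptom suggestions by category"""
--     return {
--         "Cardiovascular": [
--             "chest pain", "shortness of breath", "irregular heartbeat",
--             "rapid heartbeat", "slow heartbeat", "dizziness when standing",
--             "fainting", "swollen legs", "cold extremities", "chest pressure"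
--         ],
--         "Respiratory": [
--             "persistent cough", "wheezing", "coughing up blood",
--             "difficulty breathing", "rapid breathing", "chest congestion",
--             "sleep apnea", "excessive sputum", "noisy breathing"
--         ],
--         "Neurological": [
--             "severe headache", "confusion", "memory problems",
--             "difficulty speaking", "vision changes", "weakness in limbs",
--             "tremors", "loss of balance", "seizures", "numbness"
--         ],
--         "Gastrointestinal": [
--             "severe abdominal pain", "persistent nausea", "vomiting",
--             "difficulty swallowing", "unexplained weight loss",
--             "blood in stool", "heartburn", "loss of appetite"
--         ],
--         "General": [
--             "fatigue", "fever", "night sweats", "unexplained weight loss",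
--             "muscle weakness", "joint pain", "skin changes", "anxiety",
--             "depression", "sleep problems"
--         ]
--     }
--
-- def validate_symptoms(symptoms):
--     """Validate symptoms against a sorted deduplicated table via binary search"""
--     table = sorted({s for cat in get_symptom_suggestions().values() for s in cat})
--     valid_symptoms = []
--     unknown_symptoms = []
--     for raw in symptoms.split(","):
--         token = raw.strip().lower()
--         lo, hi = 0, len(table)
--         while lo < hi:
--             mid = (lo + hi) // 2
--             if table[mid] < token:
--                 lo = mid + 1
--             else:
--                 hi = mid
--         if lo < len(table) and table[lo] == token:
--             valid_symptoms.append(token)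
--         else:
--             unknown_symptoms.append(token)
--     return valid_symptoms, unknown_symptoms
-- ===== Notes on version B (the rewrite author's own statement) =====
-- stated objective: alternative
-- what changed: Replaces A's flat duplicate-keeping list with two linear-scan filtering comprehensions by a sorted deduplicated table built once and, per token, a hand-written bisect-left binary search in a single accumulating pass.
import Mathlib
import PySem

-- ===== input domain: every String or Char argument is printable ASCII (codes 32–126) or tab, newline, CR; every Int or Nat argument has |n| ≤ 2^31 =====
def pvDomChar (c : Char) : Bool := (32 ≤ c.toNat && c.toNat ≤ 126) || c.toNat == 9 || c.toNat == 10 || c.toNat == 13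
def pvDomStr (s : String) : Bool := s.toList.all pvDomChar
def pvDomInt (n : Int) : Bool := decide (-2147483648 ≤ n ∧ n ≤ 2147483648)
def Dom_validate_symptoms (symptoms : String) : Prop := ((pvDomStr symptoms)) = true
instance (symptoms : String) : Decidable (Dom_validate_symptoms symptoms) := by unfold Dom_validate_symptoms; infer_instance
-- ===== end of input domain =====

-- B replaces A's two linear-scan filtering comprehensions by a sorted deduplicated table
-- built once and a hand-written binary search per token in a single pass; objective: alternative.

-- ===== PORT A =====
-- get_symptom_suggestions().values(): the five category lists, in dict insertion order.
def symptomCategories : List (List String) :=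
  [["chest pain", "shortness of breath", "irregular heartbeat", "rapid heartbeat", "slow heartbeat", "dizziness when standing", "fainting", "swollen legs", "cold extremities", "chest pressure"], ["persistent cough", "wheezing", "coughing up blood", "difficulty breathing", "rapid breathing", "chest congestion", "sleep apnea", "excessive sputum", "noisy breathing"], ["severe headache", "confusion", "memory problems", "difficulty speaking", "vision changes", "weakness in limbs", "tremors", "loss of balance", "seizures", "numbness"], ["severe abdominal pain", "persistent nausea", "vomiting", "difficulty swallowing", "unexplained weight loss", "blood in stool", "heartburn", "loss of appetite"], ["fatigue", "fever", "night sweats", "unexplained weight loss", "muscle weakness", "joint pain", "skin changes", "anxiety", "depression", "sleep problems"]]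

-- A: all_symptoms built by extending with each category (duplicates kept), then two filters.
def validate_symptoms (symptoms : String) : List String × List String :=
  let all_symptoms := symptomCategories.foldl (fun acc c => acc ++ c) []
  -- split? = some here (separator "," is non-empty), so .getD [] is exact for symptoms.split(",")
  let symptom_list := ((PySem.Str.split? symptoms ",").getD []).map (fun s => PySem.Str.lower (PySem.Str.strip s))
  let valid_symptoms := symptom_list.filter (fun s => all_symptoms.contains s)
  let unknown_symptoms := symptom_list.filter (fun s => !(all_symptoms.contains s))
  (valid_symptoms, unknown_symptoms)

-- ===== PORT B =====
-- table = sorted({s for cat in get_symptom_suggestions().values() for s in cat})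
def symptomTable : List String :=
  PySem.List.sorted (PySem.Set.ofList (symptomCategories.flatMap (fun cat => cat))) (fun x => x) false

-- the inner 'while lo < hi' binary-search loop of B; lo, hi stay ≥ 0 in Python, so Nat with
-- Nat division is exact for '(lo + hi) // 2'; table[mid] is always in range, pyGetD is exact.
def bsLoop (table : List String) (token : String) (lo hi : Nat) : Nat :=
  if _h : lo < hi then
    let mid := (lo + hi) / 2
    if PySem.List.pyGetD table (mid : Int) "" < token then
      bsLoop table token (mid + 1) hi
    else
      bsLoop table token lo mid
  else lo
termination_by hi - lo
decreasing_by all_goals omega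

def validate_symptoms_alt (symptoms : String) : List String × List String :=
  let table := symptomTable
  ((PySem.Str.split? symptoms ",").getD []).foldl
    (fun (acc : List String × List String) raw =>
      let token := PySem.Str.lower (PySem.Str.strip raw)
      let lo := bsLoop table token 0 table.length
      if lo < table.length && (PySem.List.pyGetD table (lo : Int) "" == token) then
        (acc.1 ++ [token], acc.2)
      else
        (acc.1, acc.2 ++ [token]))
    ([], [])

-- ===== PRECONDITION & SPEC =====
def Spec_validate_symptoms (symptoms : String) (out : List String × List String) : Prop := out = validate_symptoms_alt symptoms
instance (symptoms : String) (out : List String × List String) : Decidable (Spec_validate_symptoms symptoms out) := by unfold Spec_validate_symptoms; infer_instance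

-- ===== CLAIM (what is proved, stated in full; the proofs are below) =====
def Claim_equal_validate_symptoms : Prop := ∀ (symptoms : String), Dom_validate_symptoms symptoms → Spec_validate_symptoms symptoms (validate_symptoms symptoms)

-- ===== LEMMAS AND PROOFS =====

-- bisect-left invariant for the hand-written loop: on a strictly sorted table the search
-- lands on a cell holding the token exactly when the token is in the table.
theorem bsLoop_spec (table : List String) (token : String)
    (hs : table.Pairwise (· < ·)) (lo hi : Nat)
    (hhi : hi ≤ table.length)
    (hlow : ∀ i : Nat, i < lo → (h : i < table.length) → table[i] < token)
    (hhigh : ∀ i : Nat, hi ≤ i → (h : i < table.length) → ¬ table[i] < token) :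
    (bsLoop table token lo hi < table.length ∧
       table.getD (bsLoop table token lo hi) "" = token) ↔ token ∈ table := by
  have hmono := List.pairwise_iff_getElem.mp hs
  rw [bsLoop]
  by_cases h : lo < hi
  · simp only [h, dif_pos]
    have hmidlt : (lo + hi) / 2 < table.length := by omega
    rw [PySem.List.pyGetD_natCast, List.getD_eq_getElem _ _ hmidlt]
    by_cases hc : table[(lo + hi) / 2] < token
    · simp only [hc, if_pos]
      exact bsLoop_spec table token hs ((lo + hi) / 2 + 1) hi hhi
        (fun i hi1 h1 => by
          rcases Nat.lt_or_ge i ((lo + hi) / 2) with hlt | hge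
          · exact lt_trans (hmono i ((lo + hi) / 2) h1 hmidlt hlt) hc
          · have : i = (lo + hi) / 2 := by omega
            subst this; exact hc)
        hhigh
    · simp only [hc, if_neg, not_false_iff]
      exact bsLoop_spec table token hs lo ((lo + hi) / 2) (by omega)
        hlow
        (fun i hi1 h1 => by
          rcases Nat.lt_or_ge ((lo + hi) / 2) i with hlt | hge
          · intro hit
            exact hc (lt_trans (hmono ((lo + hi) / 2) i hmidlt h1 hlt) hit)
          · have : i = (lo + hi) / 2 := by omega
            subst this; exact hc)
  · simp only [h, dif_neg, not_false_iff]
    constructor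
    · rintro ⟨hlt, heq⟩
      rw [List.getD_eq_getElem _ _ hlt] at heq
      exact heq ▸ List.getElem_mem hlt
    · intro hmem
      obtain ⟨j, hj, hje⟩ := List.getElem_of_mem hmem
      have hjlo : lo ≤ j := by
        by_contra hcon
        have := hlow j (by omega) hj
        rw [hje] at this
        exact lt_irrefl _ this
      have hlt : lo < table.length := by omega
      refine ⟨hlt, ?_⟩
      rw [List.getD_eq_getElem _ _ hlt]
      have hge : token ≤ table[lo] := not_lt.mp (hhigh lo (by omega) hlt)
      have hle : table[lo] ≤ token := by
        rcases Nat.lt_or_ge lo j with hlj | hlj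
        · exact le_of_lt (hje ▸ hmono lo j hlt hj hlj)
        · have : lo = j := by omega
          subst this; exact le_of_eq hje
      exact le_antisymm hle hge
termination_by hi - lo
decreasing_by all_goals omega

theorem mem_table_iff (t : String) :
    (t ∈ symptomTable) ↔ (symptomCategories.foldl (fun acc c => acc ++ c) []).contains t = true := by
  rw [symptomTable, PySem.List.mem_sorted _ (fun x => x) false t, PySem.Set.mem_ofList,
      PySem.List.foldl_append_eq_flatMap (fun c => c) symptomCategories []]
  simp

-- a single accumulating pass with one if/else is the pair of filters (partition lemma)
theorem partition_foldl {α β : Type} (p : α → Bool) (g : β → α) (l : List β) (va ua : List α) :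
    l.foldl
      (fun (acc : List α × List α) raw =>
        if p (g raw) then (acc.1 ++ [g raw], acc.2) else (acc.1, acc.2 ++ [g raw]))
      (va, ua)
    = (va ++ (l.map g).filter p, ua ++ (l.map g).filter (fun t => !p t)) := by
  induction l generalizing va ua with
  | nil => simp
  | cons h tl ih =>
    simp only [List.foldl_cons, List.map_cons, List.filter_cons]
    by_cases hc : p (g h) = true
    · simp [hc, ih]
    · simp only [Bool.not_eq_true] at hc
      simp [hc, ih]

-- B's per-token test (binary search hit) coincides with A's membership test
theorem test_eq (t : String) :
    (decide (bsLoop symptomTable t 0 symptomTable.length < symptomTable.length) &&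
      (PySem.List.pyGetD symptomTable ((bsLoop symptomTable t 0 symptomTable.length : Nat) : Int) "" == t))
    = (symptomCategories.foldl (fun acc c => acc ++ c) []).contains t := by
  have hs : symptomTable.Pairwise (· < ·) :=
    PySem.List.sorted_ofList_pairwise_lt (symptomCategories.flatMap (fun cat => cat))
  have hspec := bsLoop_spec symptomTable t hs 0 symptomTable.length (le_refl _)
    (fun i hi _ => absurd hi (Nat.not_lt_zero i))
    (fun i hi h => absurd h (by omega))
  rw [PySem.List.pyGetD_natCast]
  rw [mem_table_iff] at hspec
  by_cases hm : (symptomCategories.foldl (fun acc c => acc ++ c) []).contains t = true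
  · rw [hm] at hspec ⊢
    have := hspec.mpr rfl
    have h2 := this.2
    rw [List.getD_eq_getElem _ _ this.1] at h2
    simp [this.1, h2]
  · rw [Bool.not_eq_true] at hm
    rw [hm] at hspec ⊢
    simp only [Bool.and_eq_false_iff, decide_eq_false_iff_not, not_lt, beq_eq_false_iff_ne]
    by_cases hl : bsLoop symptomTable t 0 symptomTable.length < symptomTable.length
    · right
      intro he
      exact absurd (hspec.mp ⟨hl, he⟩) (by simp)
    · left; omega

-- ===== VERDICT (by name: the statement is the Claim_ definition above) =====
theorem validate_symptoms_spec : Claim_equal_validate_symptoms := by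
  intro symptoms _
  unfold Spec_validate_symptoms validate_symptoms validate_symptoms_alt
  rw [show ((PySem.Str.split? symptoms ",").getD []).foldl
        (fun (acc : List String × List String) raw =>
          let token := PySem.Str.lower (PySem.Str.strip raw)
          let lo := bsLoop symptomTable token 0 symptomTable.length
          if lo < symptomTable.length && (PySem.List.pyGetD symptomTable (lo : Int) "" == token) then
            (acc.1 ++ [token], acc.2)
          else (acc.1, acc.2 ++ [token]))
        ([], [])
      = _ from partition_foldl
          (fun t => decide (bsLoop symptomTable t 0 symptomTable.length < symptomTable.length) &&
            (PySem.List.pyGetD symptomTable ((bsLoop symptomTable t 0 symptomTable.length : Nat) : Int) "" == t))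
          (fun s => PySem.Str.lower (PySem.Str.strip s)) _ [] []]
  simp only [test_eq, List.nil_append]
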